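-- pv_equiv track=rewrite | github.com/HermanDp45/BioInf_gpt | sample.py | validate_and_dedup_prefix
-- ===== SOURCE A (Python) =====
-- def validate_and_dedup_prefix(tokens):
--     prefix = []
--     seen_cls = False
--     seen_type = False
--     for t in tokens:
--         if t.startswith('<cls_'):
--             if not seen_cls:
--                 prefix.append(t)
--                 seen_cls = True
--         elif t.startswith('<type_'):
--             if not seen_type:
--                 prefix.append(t)
--                 seen_type = True
--         elif t == '<sos>':
--             prefix.append(t)
--         else:
--             # тело последовательности — выходим
--             break
--     return prefix
-- ===== SOURCE B (Python) =====
-- def _is_prefix_token(t):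
--     return t.startswith('<cls_') or t.startswith('<type_') or t == '<sos>'
--
--
-- def validate_and_dedup_prefix(tokens):
--     # pass 1: the maximal leading run of prefix tokens
--     region = []
--     for t in tokens:
--         if _is_prefix_token(t):
--             region.append(t)
--         else:
--             break
--     # pass 2: dedup by category over that region only
--     out = []
--     seen = set()
--     for t in region:
--         if t == '<sos>':
--             out.append(t)
--         else:
--             cat = 'cls' if t.startswith('<cls_') else 'type'
--             if cat not in seen:
--                 seen.add(cat)
--                 out.append(t)
--     return out
-- ===== Notes on version B (the rewrite author's own statement) =====
-- stated objective: alternative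
-- what changed: Replaced the single loop-with-break holding two inline seen-flags by two separate passes: first find the maximal leading run of prefix tokens, then a distinct dedup pass over that region tracking seen categories in a set.
import Mathlib
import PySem

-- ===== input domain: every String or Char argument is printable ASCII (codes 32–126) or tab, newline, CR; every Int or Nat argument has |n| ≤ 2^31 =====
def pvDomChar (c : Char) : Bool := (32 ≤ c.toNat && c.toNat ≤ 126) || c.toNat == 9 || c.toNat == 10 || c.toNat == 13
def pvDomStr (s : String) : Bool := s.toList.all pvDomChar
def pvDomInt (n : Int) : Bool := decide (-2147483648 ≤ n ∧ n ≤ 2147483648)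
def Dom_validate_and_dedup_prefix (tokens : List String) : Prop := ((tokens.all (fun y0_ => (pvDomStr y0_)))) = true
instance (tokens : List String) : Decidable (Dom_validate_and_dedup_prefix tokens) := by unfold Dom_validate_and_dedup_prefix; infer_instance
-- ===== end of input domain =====

-- B restructures A's single loop-with-break (two inline seen-flags) into two passes:
-- find the maximal leading run of prefix tokens, then dedup that region by category ('alternative', same cost).

-- ===== PORT A =====
-- the for-loop of A: accumulator = (prefix, seen_cls, seen_type); 'break'/end of list returns prefix
def pvLoopA : List String → List String → Bool → Bool → List String
  | [], pre, _, _ => pre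
  | t :: ts, pre, seenCls, seenType =>
    if PySem.Str.startswith t "<cls_" then
      if !seenCls then pvLoopA ts (pre ++ [t]) true seenType
      else pvLoopA ts pre seenCls seenType
    else if PySem.Str.startswith t "<type_" then
      if !seenType then pvLoopA ts (pre ++ [t]) seenCls true
      else pvLoopA ts pre seenCls seenType
    else if t == "<sos>" then pvLoopA ts (pre ++ [t]) seenCls seenType
    else pre

def validate_and_dedup_prefix (tokens : List String) : List String :=
  pvLoopA tokens [] false false

-- ===== PORT B =====
def pvIsPrefixToken (t : String) : Bool :=
  PySem.Str.startswith t "<cls_" || PySem.Str.startswith t "<type_" || t == "<sos>"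

-- pass 1 of B: maximal leading run of prefix tokens
def pvRegion : List String → List String
  | [] => []
  | t :: ts => if pvIsPrefixToken t then t :: pvRegion ts else []

-- pass 2 of B: dedup by category, 'seen' is a Python set of category names
def pvDedup : List String → PySem.Set String → List String
  | [], _ => []
  | t :: ts, seen =>
    if t == "<sos>" then t :: pvDedup ts seen
    else
      let cat : String := if PySem.Str.startswith t "<cls_" then "cls" else "type"
      if !(PySem.Set.contains seen cat) then t :: pvDedup ts (PySem.Set.add seen cat)
      else pvDedup ts seen

def validate_and_dedup_prefix_alt (tokens : List String) : List String :=
  pvDedup (pvRegion tokens) PySem.Set.empty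

-- ===== PRECONDITION & SPEC =====
def Spec_validate_and_dedup_prefix (tokens : List String) (out : List String) : Prop := out = validate_and_dedup_prefix_alt tokens
instance (tokens : List String) (out : List String) : Decidable (Spec_validate_and_dedup_prefix tokens out) := by unfold Spec_validate_and_dedup_prefix; infer_instance

-- ===== CLAIM (what is proved, stated in full; the proofs are below) =====
def Claim_equal_validate_and_dedup_prefix : Prop := ∀ (tokens : List String), Dom_validate_and_dedup_prefix tokens → Spec_validate_and_dedup_prefix tokens (validate_and_dedup_prefix tokens)

-- ===== LEMMAS AND PROOFS =====
theorem sos_not_cls {t : String} (h : PySem.Str.startswith t "<cls_" = true) :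
    (t == "<sos>") = false := by
  by_cases ht : t = "<sos>"
  · subst ht; exact absurd h (by decide)
  · simp [ht]

theorem sos_not_type {t : String} (h : PySem.Str.startswith t "<type_" = true) :
    (t == "<sos>") = false := by
  by_cases ht : t = "<sos>"
  · subst ht; exact absurd h (by decide)
  · simp [ht]

theorem contains_add_self (s : PySem.Set String) (x : String) :
    (PySem.Set.add s x).contains x = true := by
  simp [PySem.Set.mem_add]

theorem contains_add_other {s : PySem.Set String} {x y : String} (h : ¬ y = x) :
    (PySem.Set.add s x).contains y = s.contains y := by
  simp only [PySem.Set.add, PySem.Set.contains_eq_listContains]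
  split
  · rfl
  · simp [h]

theorem loopA_eq_dedup_region :
    ∀ (ts acc : List String) (seen : PySem.Set String) (sc st : Bool),
      PySem.Set.contains seen "cls" = sc →
      PySem.Set.contains seen "type" = st →
      pvLoopA ts acc sc st = acc ++ pvDedup (pvRegion ts) seen := by
  intro ts
  induction ts with
  | nil => intro acc seen sc st _ _; simp [pvLoopA, pvRegion, pvDedup]
  | cons t ts ih =>
    intro acc seen sc st hcls htype
    subst hcls; subst htype
    by_cases hc : PySem.Str.startswith t "<cls_" = true
    · have hreg : pvIsPrefixToken t = true := by
        simp only [pvIsPrefixToken, hc, Bool.true_or]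
      simp only [pvLoopA, hc, if_true, pvRegion, hreg, pvDedup, sos_not_cls hc,
        Bool.false_eq_true, if_false]
      by_cases hsc : PySem.Set.contains seen "cls" = true
      · simp only [hsc, Bool.not_true, Bool.false_eq_true, if_false]
        exact ih acc seen _ _ hsc rfl
      · have hsc' : PySem.Set.contains seen "cls" = false := by
          revert hsc; cases PySem.Set.contains seen "cls" <;> simp
        simp only [hsc', Bool.not_false, if_true]
        rw [ih (acc ++ [t]) (PySem.Set.add seen "cls") true (PySem.Set.contains seen "type")
          (by rw [contains_add_self]) (by rw [contains_add_other (by decide)])]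
        simp
    · have hc' : PySem.Str.startswith t "<cls_" = false := by
        revert hc; cases PySem.Str.startswith t "<cls_" <;> simp
      by_cases ht : PySem.Str.startswith t "<type_" = true
      · have hreg : pvIsPrefixToken t = true := by
          simp only [pvIsPrefixToken, ht, Bool.true_or, Bool.or_true]
        simp only [pvLoopA, hc', Bool.false_eq_true, if_false, ht, if_true, pvRegion, hreg,
          pvDedup, sos_not_type ht]
        by_cases hst : PySem.Set.contains seen "type" = true
        · simp only [hst, Bool.not_true, Bool.false_eq_true, if_false]
          exact ih acc seen _ _ rfl hst
        · have hst' : PySem.Set.contains seen "type" = false := by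
            revert hst; cases PySem.Set.contains seen "type" <;> simp
          simp only [hst', Bool.not_false, if_true]
          rw [ih (acc ++ [t]) (PySem.Set.add seen "type") (PySem.Set.contains seen "cls") true
            (by rw [contains_add_other (by decide)]) (by rw [contains_add_self])]
          simp
      · have ht' : PySem.Str.startswith t "<type_" = false := by
          revert ht; cases PySem.Str.startswith t "<type_" <;> simp
        by_cases hs : t = "<sos>"
        · subst hs
          have hreg : pvIsPrefixToken "<sos>" = true := by decide
          simp only [pvLoopA, hc', ht', Bool.false_eq_true, if_false, BEq.rfl, if_true,
            pvRegion, hreg, pvDedup]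
          rw [ih (acc ++ ["<sos>"]) seen _ _ rfl rfl]
          simp
        · have hs' : (t == "<sos>") = false := by simp [hs]
          have hreg : pvIsPrefixToken t = false := by
            simp only [pvIsPrefixToken, hc', ht', hs', Bool.or_self]
          simp only [pvLoopA, pvRegion, pvDedup, hreg, hc', ht', hs',
            Bool.false_eq_true, if_false, List.append_nil]

-- ===== VERDICT (by name: the statement is the Claim_ definition above) =====
theorem validate_and_dedup_prefix_spec : Claim_equal_validate_and_dedup_prefix := by
  intro tokens _
  unfold Spec_validate_and_dedup_prefix validate_and_dedup_prefix validate_and_dedup_prefix_alt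
  rw [loopA_eq_dedup_region tokens [] PySem.Set.empty false false (by decide) (by decide)]
  simp
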